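-- pv_equiv track=rewrite | github.com/bhargavraju/practice-dsa | heaps_and_greedy/chocolates.py | nchoc
-- ===== SOURCE A (Python) =====
-- import heapq
--
-- def nchoc(A, B):
--     arr = list(map(lambda x: -x, B))
--     heapq.heapify(arr)
--     max_choc = 0
--     for i in range(A):
--         max_size = -arr[0]
--         max_choc += max_size
--         heapq.heapreplace(arr, -(max_size//2))
--     return max_choc % 1000000007
-- ===== SOURCE B (Python) =====
-- def nchoc(A, B):
--     arr = list(B)
--     total = 0
--     for _ in range(A):
--         best = 0
--         for j in range(1, len(arr)):
--             if arr[j] > arr[best]: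
--                 best = j
--         m = arr[best]
--         total += m
--         arr[best] = m // 2
--     return total % 1000000007
-- ===== Notes on version B (the rewrite author's own statement) =====
-- stated objective: simpler
-- what changed: Replaces the negated heap (heapify + heapreplace) by a plain repeated linear scan for the maximum on a copied list, halving the found element in place; Pre_ only excludes A > 0 with empty B, where both versions raise IndexError.
import Mathlib
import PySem

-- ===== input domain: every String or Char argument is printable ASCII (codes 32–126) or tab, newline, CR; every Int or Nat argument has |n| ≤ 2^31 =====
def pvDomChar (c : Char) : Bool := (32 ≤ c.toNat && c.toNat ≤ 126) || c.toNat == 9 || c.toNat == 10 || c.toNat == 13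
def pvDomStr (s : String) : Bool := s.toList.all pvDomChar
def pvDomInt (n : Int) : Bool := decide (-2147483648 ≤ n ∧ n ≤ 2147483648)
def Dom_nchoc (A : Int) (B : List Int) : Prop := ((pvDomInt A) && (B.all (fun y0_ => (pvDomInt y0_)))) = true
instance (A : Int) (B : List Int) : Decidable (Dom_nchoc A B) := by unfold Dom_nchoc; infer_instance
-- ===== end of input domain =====

-- B replaces A's negated heap (heapify + heapreplace) by a repeated linear max-scan over a copy of the list: simpler, no heap.

-- ===== PORT A =====
-- hand port of heapq._siftdown (PySem has no heapq); exact step for step: indices touched are always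
-- in range, newitem is passed explicitly (CPython reads it from heap[pos] on entry)
def pySiftdownLoop (heap : List Int) (startpos pos : Nat) (newitem : Int) : List Int :=
  if _h : startpos < pos then
    let parentpos := (pos - 1) / 2
    let parent := heap.getD parentpos 0
    if newitem < parent then
      pySiftdownLoop (heap.set pos parent) startpos parentpos newitem
    else
      heap.set pos newitem
  else
    heap.set pos newitem
termination_by pos
decreasing_by omega

-- hand port of heapq._siftup: descend moving the smaller child up, then sift the saved item down
def pySiftupLoop (heap : List Int) (startpos pos : Nat) (newitem : Int) : List Int :=
  if _h : 2 * pos + 1 < heap.length then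
    let childpos := 2 * pos + 1
    let rightpos := childpos + 1
    let childpos := if rightpos < heap.length ∧ ¬ (heap.getD childpos 0 < heap.getD rightpos 0)
                    then rightpos else childpos
    pySiftupLoop (heap.set pos (heap.getD childpos 0)) startpos childpos newitem
  else
    pySiftdownLoop (heap.set pos newitem) startpos pos newitem
termination_by heap.length - pos
decreasing_by simp; split <;> omega

def pySiftup (heap : List Int) (pos : Nat) : List Int :=
  pySiftupLoop heap pos pos (heap.getD pos 0)

-- heapq.heapify: for i in reversed(range(n//2)): _siftup(x, i)
def pyHeapify (x : List Int) : List Int :=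
  ((List.range (x.length / 2)).reverse).foldl (fun h i => pySiftup h i) x

-- heapq.heapreplace (its returned old root is unused by A and dropped)
def pyHeapreplace (heap : List Int) (item : Int) : List Int :=
  pySiftup (heap.set 0 item) 0

def nchoc (A : Int) (B : List Int) : Int :=
  let arr := pyHeapify (B.map (fun x => -x))
  let r := (PySem.List.pyRange 0 A 1).foldl
    (fun (st : List Int × Int) _i =>
      let max_size := -(st.1.getD 0 0)
      (pyHeapreplace st.1 (-(PySem.Int.floordiv max_size 2)), st.2 + max_size))
    (arr, 0)
  PySem.Int.mod r.2 1000000007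

-- ===== PORT B =====
def nchoc_alt (A : Int) (B : List Int) : Int :=
  let r := (PySem.List.pyRange 0 A 1).foldl
    (fun (st : List Int × Int) _i =>
      let arr := st.1
      let best := (PySem.List.pyRange 1 (PySem.List.len arr) 1).foldl
        (fun best j => if arr.getD best 0 < arr.getD j.toNat 0 then j.toNat else best) 0
      let m := arr.getD best 0
      (arr.set best (PySem.Int.floordiv m 2), st.2 + m))
    (B, 0)
  PySem.Int.mod r.2 1000000007

-- ===== PRECONDITION & SPEC =====
-- Pre_ excludes only A > 0 with empty B, where the Python A raises IndexError at arr[0]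
-- (and the Python B raises IndexError at arr[best] as well).
def Pre_nchoc (A : Int) (B : List Int) : Prop := B ≠ [] ∨ A ≤ 0
instance (A : Int) (B : List Int) : Decidable (Pre_nchoc A B) := by unfold Pre_nchoc; infer_instance
def pvWitness_nchoc : Int × List Int := (3, [5, 1, 7])

def Spec_nchoc (A : Int) (B : List Int) (out : Int) : Prop := out = nchoc_alt A B
instance (A : Int) (B : List Int) (out : Int) : Decidable (Spec_nchoc A B out) := by unfold Spec_nchoc; infer_instance

-- ===== CLAIM (what is proved, stated in full; the proofs are below) =====
def Claim_equal_nchoc : Prop := ∀ (A : Int) (B : List Int), Dom_nchoc A B → Pre_nchoc A B → Spec_nchoc A B (nchoc A B)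

-- ===== LEMMAS AND PROOFS =====

theorem length_pySiftdownLoop (heap : List Int) (s p : Nat) (x : Int) :
    (pySiftdownLoop heap s p x).length = heap.length := by
  fun_induction pySiftdownLoop with
  | _ => simp_all

theorem perm_cons_set (t : List Int) (m : Nat) (x : Int) (hm : m < t.length) :
    (t.getD m 0 :: t.set m x).Perm (x :: t) := by
  induction t generalizing m with
  | nil => simp at hm
  | cons b u ih =>
    cases m with
    | zero => simpa using List.Perm.swap x b u
    | succ m =>
      simp only [List.getD_cons_succ, List.set_cons_succ]
      exact ((List.Perm.swap _ _ _).trans ((ih m (by simpa using hm)).cons b)).trans (List.Perm.swap _ _ _)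

theorem perm_cons_set_comm (t : List Int) (m : Nat) (x a : Int) (hm : m < t.length) :
    (x :: t.set m a).Perm (a :: t.set m x) := by
  induction t generalizing m with
  | nil => simp at hm
  | cons b u ih =>
    cases m with
    | zero => simpa using List.Perm.swap a x u
    | succ m =>
      simp only [List.set_cons_succ]
      exact ((List.Perm.swap _ _ _).trans ((ih m (by simpa using hm)).cons b)).trans (List.Perm.swap _ _ _)

theorem perm_set_set (l : List Int) (i j : Nat) (x : Int)
    (hi : i < l.length) (hj : j < l.length) (hne : i ≠ j) :
    ((l.set i (l.getD j 0)).set j x).Perm (l.set i x) := by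
  induction l generalizing i j with
  | nil => simp at hi
  | cons a t ih =>
    cases i with
    | zero =>
      cases j with
      | zero => omega
      | succ k =>
        simp only [List.getD_cons_succ, List.set_cons_zero, List.set_cons_succ]
        exact perm_cons_set t k x (by simpa using hj)
    | succ m =>
      cases j with
      | zero =>
        simp only [List.getD_cons_zero, List.set_cons_succ, List.set_cons_zero]
        exact perm_cons_set_comm t m x a (by simpa using hi)
      | succ k =>
        simp only [List.getD_cons_succ, List.set_cons_succ]
        exact (ih m k (by simpa using hi) (by simpa using hj) (by omega)).cons a

theorem perm_pySiftdownLoop (heap : List Int) (s p : Nat) (x : Int) (hp : p < heap.length) :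
    (pySiftdownLoop heap s p x).Perm (heap.set p x) := by
  fun_induction pySiftdownLoop with
  | case1 a b c d e f g =>
    exact ((g (by simp; omega)).trans (perm_set_set a b d x hp (by omega) (by omega)))
  | case2 => exact List.Perm.refl _
  | case3 => exact List.Perm.refl _

theorem length_pySiftupLoop (heap : List Int) (s p : Nat) (x : Int) :
    (pySiftupLoop heap s p x).length = heap.length := by
  fun_induction pySiftupLoop with
  | case1 => simp_all
  | case2 => simp [length_pySiftdownLoop]

theorem perm_pySiftupLoop (heap : List Int) (s p : Nat) (x : Int) (hp : p < heap.length) :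
    (pySiftupLoop heap s p x).Perm (heap.set p x) := by
  fun_induction pySiftupLoop with
  | case1 a b c d e f g =>
    have hf : b < f ∧ f < a.length := by
      by_cases h : e < a.length ∧ ¬ a.getD d 0 < a.getD e 0
      · simp only [f, dif_pos h]; exact ⟨by omega, h.1⟩
      · simp only [f, dif_neg h]; omega
    exact (g (by simp; omega)).trans (perm_set_set a b f x hp (by omega) (by omega))
  | case2 a b c =>
    exact (perm_pySiftdownLoop _ _ _ _ (by simpa using hp)).trans (by simp)

def anc (a b : Nat) : Bool :=
  if b = a then true else if b = 0 then false else anc a ((b - 1) / 2)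
termination_by b
decreasing_by omega

theorem anc_par {s b : Nat} (hb : 0 < b) (h : anc s ((b - 1) / 2) = true) : anc s b = true := by
  unfold anc
  split
  · rfl
  · split
    · omega
    · exact h

theorem anc_le {a b : Nat} (h : anc a b = true) : a ≤ b := by
  induction b using Nat.strong_induction_on with
  | _ b ih =>
    unfold anc at h
    split at h
    · omega
    · split at h
      · simp at h
      · have := ih ((b - 1) / 2) (by omega) h; omega

theorem anc_unpar {s b : Nat} (h : anc s b = true) (hne : b ≠ s) : anc s ((b - 1) / 2) = true := by
  unfold anc at h
  split at h
  · omega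
  · split at h
    · simp at h
    · exact h

theorem anc_refl (a : Nat) : anc a a = true := by unfold anc; simp

theorem anc_zero (b : Nat) : anc 0 b = true := by
  induction b using Nat.strong_induction_on with
  | _ b ih =>
    unfold anc
    by_cases hb : b = 0
    · simp [hb]
    · simp [hb]; exact ih _ (by omega)

theorem gset_eq (l : List Int) (i : Nat) (x : Int) (h : i < l.length) : (l.set i x).getD i 0 = x := by
  simp [List.getD_eq_getElem?_getD, h]

theorem gset_ne (l : List Int) (i j : Nat) (x : Int) (h : i ≠ j) : (l.set i x).getD j 0 = l.getD j 0 := by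
  simp [List.getD_eq_getElem?_getD, List.getElem?_set_ne, h]

theorem pySiftdownLoop_heap (heap : List Int) (s p : Nat) (x : Int)
    (hp : p < heap.length) (hsp : anc s p = true)
    (preA : ∀ j, 0 < j → j < heap.length → anc s ((j - 1) / 2) = true → j ≠ p →
      (heap.set p x).getD ((j - 1) / 2) 0 ≤ (heap.set p x).getD j 0)
    (preB : p ≠ s → ∀ j, 0 < j → j < heap.length → (j - 1) / 2 = p →
      (heap.set p x).getD ((p - 1) / 2) 0 ≤ (heap.set p x).getD j 0) :
    (∀ j, 0 < j → j < heap.length → anc s ((j - 1) / 2) = true →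
      (pySiftdownLoop heap s p x).getD ((j - 1) / 2) 0 ≤ (pySiftdownLoop heap s p x).getD j 0)
    ∧ (∀ k, k < heap.length → anc s k = false →
      (pySiftdownLoop heap s p x).getD k 0 = heap.getD k 0) := by
  fun_induction pySiftdownLoop with
  | case1 a b c d e f g =>
    have hb0 : 0 < b := by omega
    have hd : d < b := by omega
    have hbs : b ≠ s := by omega
    have hsd : anc s d = true := anc_unpar hsp hbs
    have hdn : d < a.length := by omega
    -- values of v' = (a.set b e).set d x versus v = a.set b x
    have hv'b : ((a.set b e).set d x).getD b 0 = e := by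
      rw [gset_ne _ _ _ _ (by omega), gset_eq _ _ _ hp]
    have hv'd : ((a.set b e).set d x).getD d 0 = x := gset_eq _ _ _ (by simp; omega)
    have hv'o : ∀ k, k ≠ b → k ≠ d → ((a.set b e).set d x).getD k 0 = a.getD k 0 := by
      intro k h1 h2
      rw [gset_ne _ _ _ _ (by omega), gset_ne _ _ _ _ (by omega)]
    have hvb : (a.set b x).getD b 0 = x := gset_eq _ _ _ hp
    have hvo : ∀ k, k ≠ b → (a.set b x).getD k 0 = a.getD k 0 := by
      intro k h1; rw [gset_ne _ _ _ _ (by omega)]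
    have hvd : (a.set b x).getD d 0 = e := by rw [hvo d (by omega)]
    have main := g (by simp; omega) hsd ?_ ?_
    · refine ⟨fun j hj1 hj2 hj3 => ?_, fun k hk1 hk2 => ?_⟩
      · exact main.1 j hj1 (by simpa using hj2) hj3
      · have hkb : k ≠ b := by
          intro hkb; rw [hkb] at hk2; rw [hsp] at hk2; exact Bool.true_eq_false.mp hk2
        rw [main.2 k (by simpa using hk1) hk2]
        exact gset_ne _ _ _ _ (by omega)
    · -- preA for the recursive call
      intro j hj1 hj2 hj3 hj4
      have hj2' : j < a.length := by simpa using hj2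
      by_cases hjb : j = b
      · subst hjb
        have : (j - 1) / 2 = d := by omega
        rw [this, hv'd, hv'b]; exact le_of_lt f
      · have hv'j : ((a.set b e).set d x).getD j 0 = (a.set b x).getD j 0 := by
          rw [hv'o j hjb hj4, hvo j hjb]
        by_cases hpb : (j - 1) / 2 = b
        · rw [hpb, hv'b, hv'j]
          have := preB hbs j hj1 hj2' hpb
          rwa [hvd] at this
        · by_cases hpd : (j - 1) / 2 = d
          · rw [hpd, hv'd, hv'j]
            have := preA j hj1 hj2' (by rwa [hpd]) hjb
            rw [hpd, hvd] at this
            omega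
          · rw [hv'o _ hpb hpd, hv'j]
            have := preA j hj1 hj2' (by simpa using hj3) hjb
            rwa [hvo _ hpb] at this
    · -- preB for the recursive call
      intro hds j hj1 hj2 hj3
      have hj2' : j < a.length := by simpa using hj2
      have hd0 : 0 < d := by
        rcases Nat.eq_zero_or_pos d with h0 | h0
        · exfalso; apply hds; have := anc_le hsd; omega
        · exact h0
      have hpd : (d - 1) / 2 < d := by omega
      have hsdp : anc s ((d - 1) / 2) = true := anc_unpar hsd hds
      have hAd := preA d hd0 hdn hsdp (by omega)
      rw [hvd, hvo _ (by omega)] at hAd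
      have hv'pd : ((a.set b e).set d x).getD ((d - 1) / 2) 0 = a.getD ((d - 1) / 2) 0 :=
        hv'o _ (by omega) (by omega)
      rw [hv'pd]
      by_cases hjb : j = b
      · subst hjb; rw [hv'b]; exact hAd
      · have hjd : j ≠ d := by omega
        rw [hv'o j hjb hjd]
        have := preA j hj1 hj2' (by rw [hj3]; exact hsd) hjb
        rw [hj3, hvd, hvo j hjb] at this
        omega
  | case2 a b c d e f =>
    have hb0 : 0 < b := by omega
    have hbs : b ≠ s := by omega
    have hd : d < b := by omega
    refine ⟨fun j hj1 hj2 hj3 => ?_, fun k hk1 hk2 => ?_⟩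
    · by_cases hjb : j = b
      · subst hjb
        have hjd : (j - 1) / 2 = d := rfl
        rw [hjd, gset_ne _ _ _ _ (by omega), gset_eq _ _ _ hp]
        omega
      · exact preA j hj1 hj2 hj3 hjb
    · have hkb : k ≠ b := by
        intro hkb; rw [hkb, hsp] at hk2; exact Bool.true_eq_false.mp hk2
      exact gset_ne _ _ _ _ (by omega)
  | case3 a b c =>
    have hbs : b = s := by have := anc_le hsp; omega
    refine ⟨fun j hj1 hj2 hj3 => ?_, fun k hk1 hk2 => ?_⟩
    · by_cases hjb : j = b
      · exfalso; subst hjb; subst hbs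
        have := anc_le hj3; omega
      · exact preA j hj1 hj2 hj3 hjb
    · have hkb : k ≠ b := by
        intro hkb; rw [hkb, hsp] at hk2; exact Bool.true_eq_false.mp hk2
      exact gset_ne _ _ _ _ (by omega)

theorem pySiftupLoop_heap (heap : List Int) (s p : Nat) (x : Int)
    (hp : p < heap.length) (hsp : anc s p = true)
    (preA : ∀ j, 0 < j → j < heap.length → anc s ((j - 1) / 2) = true → j ≠ p → (j - 1) / 2 ≠ p →
      (heap.set p x).getD ((j - 1) / 2) 0 ≤ (heap.set p x).getD j 0)
    (preB : p ≠ s → ∀ j, 0 < j → j < heap.length → (j - 1) / 2 = p →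
      (heap.set p x).getD ((p - 1) / 2) 0 ≤ (heap.set p x).getD j 0) :
    (∀ j, 0 < j → j < heap.length → anc s ((j - 1) / 2) = true →
      (pySiftupLoop heap s p x).getD ((j - 1) / 2) 0 ≤ (pySiftupLoop heap s p x).getD j 0)
    ∧ (∀ k, k < heap.length → anc s k = false →
      (pySiftupLoop heap s p x).getD k 0 = heap.getD k 0) := by
  fun_induction pySiftupLoop with
  | case1 a b c d e f g =>
    have hf1 : b < f ∧ f < a.length := by
      by_cases h : e < a.length ∧ ¬ a.getD d 0 < a.getD e 0
      · simp only [f, dif_pos h]; exact ⟨by omega, h.1⟩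
      · simp only [f, dif_neg h]; omega
    have hf3 : (f - 1) / 2 = b := by
      by_cases h : e < a.length ∧ ¬ a.getD d 0 < a.getD e 0
      · simp only [f, dif_pos h]; omega
      · simp only [f, dif_neg h]; omega
    have hmin : ∀ j, 0 < j → j < a.length → (j - 1) / 2 = b → a.getD f 0 ≤ a.getD j 0 := by
      intro j hj1 hj2 hj3
      have hjde : j = d ∨ j = e := by omega
      by_cases h : e < a.length ∧ ¬ a.getD d 0 < a.getD e 0
      · simp only [f, dif_pos h]
        rcases hjde with hj | hj
        · subst hj; omega
        · subst hj; exact le_refl _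
      · simp only [f, dif_neg h]
        rcases hjde with hj | hj
        · subst hj; exact le_refl _
        · subst hj
          rcases not_and_or.mp h with h1 | h1
          · omega
          · have := not_not.mp h1; omega
    have hb0f : 0 < f := by omega
    have hsf : anc s f = true := anc_par hb0f (by rwa [hf3])
    -- v' values
    have hv'f : ((a.set b (a.getD f 0)).set f x).getD f 0 = x := gset_eq _ _ _ (by simp; omega)
    have hv'b : ((a.set b (a.getD f 0)).set f x).getD b 0 = a.getD f 0 := by
      rw [gset_ne _ _ _ _ (by omega), gset_eq _ _ _ hp]
    have hv'o : ∀ k, k ≠ b → k ≠ f → ((a.set b (a.getD f 0)).set f x).getD k 0 = a.getD k 0 := by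
      intro k h1 h2
      rw [gset_ne _ _ _ _ (by omega), gset_ne _ _ _ _ (by omega)]
    have hvo : ∀ k, k ≠ b → (a.set b x).getD k 0 = a.getD k 0 := by
      intro k h1; rw [gset_ne _ _ _ _ (by omega)]
    have main := g (by simp; omega) hsf ?_ ?_
    · refine ⟨fun j hj1 hj2 hj3 => ?_, fun k hk1 hk2 => ?_⟩
      · exact main.1 j hj1 (by simpa using hj2) hj3
      · have hkb : k ≠ b := by
          intro hkb; rw [hkb, hsp] at hk2; exact Bool.true_eq_false.mp hk2
        rw [main.2 k (by simpa using hk1) hk2]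
        exact gset_ne _ _ _ _ (by omega)
    · -- preA for the recursive call
      intro j hj1 hj2 hj3 hj4 hj5
      have hj2' : j < a.length := by simpa using hj2
      by_cases hjb : j = b
      · subst hjb
        have hjs : j ≠ s := by
          intro hjs
          subst hjs
          have := anc_le hj3; omega
        have hB := preB hjs f hb0f hf1.2 hf3
        rw [hvo _ (by omega), hvo _ (by omega)] at hB
        rw [hv'b, hv'o ((j - 1) / 2) (by omega) (by omega)]
        exact hB
      · by_cases hpjb : (j - 1) / 2 = b
        · -- sibling of f
          rw [hv'o j hjb hj4]
          have h1 : ((a.set b (a.getD f 0)).set f x).getD ((j - 1) / 2) 0 = a.getD f 0 := by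
            rw [hpjb]; exact hv'b
          rw [h1]
          exact hmin j hj1 hj2' hpjb
        · rw [hv'o j hjb hj4]
          have h2 : ((a.set b (a.getD f 0)).set f x).getD ((j - 1) / 2) 0 = a.getD ((j - 1) / 2) 0 :=
            hv'o _ hpjb hj5
          rw [h2]
          have := preA j hj1 hj2' (by simpa using hj3) hjb hpjb
          rwa [hvo j hjb, hvo _ hpjb] at this
    · -- preB for the recursive call
      intro hfs j hj1 hj2 hj3
      have hj2' : j < a.length := by simpa using hj2
      have hjgt : f < j := by omega
      have hjb : j ≠ b := by omega
      have hjf : j ≠ f := by omega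
      rw [hf3, hv'b, hv'o j hjb hjf]
      have := preA j hj1 hj2' (by rw [hj3]; exact hsf) hjb (by omega)
      rwa [hj3, hvo _ (by omega), hvo j hjb] at this
  | case2 a b c =>
    have hlen : (a.set b x).length = a.length := by simp
    have hset : (a.set b x).set b x = a.set b x := List.set_set ..
    have H := pySiftdownLoop_heap (a.set b x) s b x (by omega) hsp ?_ ?_
    · refine ⟨fun j hj1 hj2 hj3 => H.1 j hj1 (by omega) hj3, fun k hk1 hk2 => ?_⟩
      rw [H.2 k (by omega) hk2]
      have hkb : k ≠ b := by
        intro hkb; rw [hkb, hsp] at hk2; exact Bool.true_eq_false.mp hk2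
      exact gset_ne _ _ _ _ (by omega)
    · intro j hj1 hj2 hj3 hj4
      rw [hset]
      have hpjb : (j - 1) / 2 ≠ b := by omega
      exact preA j hj1 (by omega) hj3 hj4 hpjb
    · intro hbs j hj1 hj2 hj3
      exfalso; omega

def IsHeap (h : List Int) : Prop :=
  ∀ j, 0 < j → j < h.length → h.getD ((j - 1) / 2) 0 ≤ h.getD j 0

theorem set_getD_self (h : List Int) (i : Nat) (hi : i < h.length) : h.set i (h.getD i 0) = h := by
  rw [List.getD_eq_getElem h 0 hi]
  exact List.set_getElem_self hi

theorem pySiftup_perm (h : List Int) (i : Nat) (hi : i < h.length) : (pySiftup h i).Perm h := by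
  have := perm_pySiftupLoop h i i (h.getD i 0) hi
  rwa [set_getD_self h i hi] at this

theorem pySiftup_length (h : List Int) (i : Nat) : (pySiftup h i).length = h.length :=
  length_pySiftupLoop ..

theorem pySiftup_heap (h : List Int) (t : Nat) (ht : t < h.length)
    (inv : ∀ j, 0 < j → j < h.length → t + 1 ≤ (j - 1) / 2 → h.getD ((j - 1) / 2) 0 ≤ h.getD j 0) :
    (∀ j, 0 < j → j < h.length → t ≤ (j - 1) / 2 →
      (pySiftup h t).getD ((j - 1) / 2) 0 ≤ (pySiftup h t).getD j 0) := by
  unfold pySiftup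
  have hset : h.set t (h.getD t 0) = h := set_getD_self h t ht
  have H := pySiftupLoop_heap h t t (h.getD t 0) ht (anc_refl t) ?_ ?_
  · intro j hj1 hj2 hj3
    cases hA : anc t ((j - 1) / 2) with
    | true =>
      exact H.1 j hj1 hj2 hA
    | false =>
      have hjt : t < j := by omega
      have hAj : anc t j = false := by
        cases hAj : anc t j with
        | true => exfalso; rw [anc_unpar hAj (by omega)] at hA; exact Bool.true_eq_false.mp hA
        | false => rfl
      have hpjt : (j - 1) / 2 ≠ t := by
        intro hh; rw [hh, anc_refl] at hA; exact Bool.true_eq_false.mp hA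
      rw [H.2 j hj2 hAj, H.2 ((j - 1) / 2) (by omega) hA]
      exact inv j hj1 hj2 (by omega)
  · intro j hj1 hj2 hj3 hj4 hj5
    rw [hset]
    have := anc_le hj3
    exact inv j hj1 hj2 (by omega)
  · intro hts; exact absurd rfl hts

theorem heapify_aux (x0 : List Int) : ∀ (t : Nat) (h : List Int), h.Perm x0 → 2 * t ≤ h.length →
    (∀ j, 0 < j → j < h.length → t ≤ (j - 1) / 2 → h.getD ((j - 1) / 2) 0 ≤ h.getD j 0) →
    ((((List.range t).reverse).foldl (fun h i => pySiftup h i) h).Perm x0 ∧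
     IsHeap (((List.range t).reverse).foldl (fun h i => pySiftup h i) h)) := by
  intro t
  induction t with
  | zero =>
    intro h hperm hle hinv
    refine ⟨by simpa using hperm, ?_⟩
    simp only [List.range_zero, List.reverse_nil, List.foldl_nil]
    intro j hj1 hj2
    exact hinv j hj1 hj2 (by omega)
  | succ t ih =>
    intro h hperm hle hinv
    have hrt : t < h.length := by omega
    have hstep : (List.range (t + 1)).reverse = t :: (List.range t).reverse := by
      rw [List.range_succ, List.reverse_append]; rfl
    rw [hstep]
    simp only [List.foldl_cons]
    have hperm' : (pySiftup h t).Perm x0 := (pySiftup_perm h t hrt).trans hperm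
    have hlen' : (pySiftup h t).length = h.length := pySiftup_length h t
    have hinv' := pySiftup_heap h t hrt (fun j hj1 hj2 hj3 => hinv j hj1 hj2 (by omega))
    exact ih (pySiftup h t) hperm' (by omega) (fun j hj1 hj2 hj3 => hinv' j hj1 (by omega) hj3)

theorem pyHeapify_perm (x : List Int) : (pyHeapify x).Perm x :=
  (heapify_aux x (x.length / 2) x (List.Perm.refl x) (by omega)
    (fun j hj1 hj2 hj3 => by omega)).1

theorem pyHeapify_isHeap (x : List Int) : IsHeap (pyHeapify x) :=
  (heapify_aux x (x.length / 2) x (List.Perm.refl x) (by omega)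
    (fun j hj1 hj2 hj3 => by omega)).2

theorem pyHeapreplace_perm (h : List Int) (item : Int) (hne : h ≠ []) :
    (pyHeapreplace h item).Perm (h.set 0 item) := by
  have h0 : 0 < (h.set 0 item).length := by
    simp; exact List.length_pos_iff.mpr hne
  have := perm_pySiftupLoop (h.set 0 item) 0 0 ((h.set 0 item).getD 0 0) h0
  rwa [set_getD_self _ 0 h0] at this

theorem pyHeapreplace_isHeap (h : List Int) (item : Int) (hne : h ≠ []) (hh : IsHeap h) :
    IsHeap (pyHeapreplace h item) := by
  have h0 : 0 < (h.set 0 item).length := by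
    simp; exact List.length_pos_iff.mpr hne
  have hset : (h.set 0 item).set 0 ((h.set 0 item).getD 0 0) = h.set 0 item :=
    set_getD_self _ 0 h0
  have H := pySiftupLoop_heap (h.set 0 item) 0 0 ((h.set 0 item).getD 0 0) h0 (anc_refl 0) ?_ ?_
  · intro j hj1 hj2
    unfold pyHeapreplace pySiftup
    have hl : (pySiftupLoop (h.set 0 item) 0 0 ((h.set 0 item).getD 0 0)).length = (h.set 0 item).length := length_pySiftupLoop ..
    refine H.1 j hj1 ?_ (anc_zero _)
    have : (pyHeapreplace h item).length = (pySiftupLoop (h.set 0 item) 0 0 ((h.set 0 item).getD 0 0)).length := rfl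
    omega
  · intro j hj1 hj2 hj3 hj4 hj5
    rw [hset, gset_ne _ _ _ _ (by omega), gset_ne _ _ _ _ (by omega)]
    exact hh j hj1 (by simpa using hj2)
  · intro h0s; exact absurd rfl h0s

theorem isHeap_root_min (h : List Int) (hh : IsHeap h) :
    ∀ j, j < h.length → h.getD 0 0 ≤ h.getD j 0 := by
  intro j
  induction j using Nat.strong_induction_on with
  | _ j ih =>
    intro hj
    rcases Nat.eq_zero_or_pos j with h0 | h0
    · subst h0; exact le_refl _
    · exact (ih ((j - 1) / 2) (by omega) (by omega)).trans (hh j h0 hj)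

theorem perm_set_of_getD_eq (l₁ l₂ : List Int) (i j : Nat) (v : Int)
    (hp : l₁.Perm l₂) (hi : i < l₁.length) (hj : j < l₂.length)
    (hv : l₁.getD i 0 = l₂.getD j 0) :
    (l₁.set i v).Perm (l₂.set j v) := by
  have h1 := perm_cons_set l₁ i v hi
  have h2 := perm_cons_set l₂ j v hj
  rw [hv] at h1
  exact List.Perm.cons_inv (h1.trans ((hp.cons v).trans h2.symm))

theorem scan_best (arr : List Int) : ∀ (js : List Int) (b : Nat), b < arr.length →
    (∀ j ∈ js, 0 ≤ j ∧ j < (arr.length : Int)) →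
    (js.foldl (fun best j => if arr.getD best 0 < arr.getD j.toNat 0 then j.toNat else best) b) < arr.length
    ∧ arr.getD b 0 ≤ arr.getD (js.foldl (fun best j => if arr.getD best 0 < arr.getD j.toNat 0 then j.toNat else best) b) 0
    ∧ ∀ j ∈ js, arr.getD j.toNat 0 ≤ arr.getD (js.foldl (fun best j => if arr.getD best 0 < arr.getD j.toNat 0 then j.toNat else best) b) 0 := by
  intro js
  induction js with
  | nil =>
    intro b hb _
    exact ⟨hb, le_refl _, by simp⟩
  | cons j js ih =>
    intro b hb hjs
    simp only [List.foldl_cons]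
    have hj := hjs j List.mem_cons_self
    have hb'lt : (if arr.getD b 0 < arr.getD j.toNat 0 then j.toNat else b) < arr.length := by
      split
      · omega
      · exact hb
    have hbb' : arr.getD b 0 ≤ arr.getD (if arr.getD b 0 < arr.getD j.toNat 0 then j.toNat else b) 0 := by
      split
      · next h => exact le_of_lt h
      · exact le_refl _
    have hjb' : arr.getD j.toNat 0 ≤ arr.getD (if arr.getD b 0 < arr.getD j.toNat 0 then j.toNat else b) 0 := by
      split
      · exact le_refl _
      · next h => omega
    have H := ih _ hb'lt (fun j' hj' => hjs j' (List.mem_cons_of_mem j hj'))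
    refine ⟨H.1, hbb'.trans H.2.1, fun j' hj' => ?_⟩
    rcases List.mem_cons.mp hj' with rfl | hmem
    · exact hjb'.trans H.2.1
    · exact H.2.2 j' hmem

theorem foldl_rel {σ τ : Type} (R : σ → τ → Prop) (f : σ → Int → σ) (g : τ → Int → τ)
    (hstep : ∀ i s t, R s t → R (f s i) (g t i)) :
    ∀ (l : List Int) (s : σ) (t : τ), R s t → R (l.foldl f s) (l.foldl g t) := by
  intro l
  induction l with
  | nil => intro s t h; exact h
  | cons a l ih =>
    intro s t h
    simp only [List.foldl_cons]
    exact ih _ _ (hstep a s t h)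

theorem step_rel (B : List Int) (hB : B ≠ []) (i : Int) (sa sb : List Int × Int)
    (h : sa.1.Perm (sb.1.map (fun z => -z)) ∧ IsHeap sa.1 ∧ sb.1.length = B.length ∧ sa.2 = sb.2) :
    ((fun (st : List Int × Int) _i =>
      let max_size := -(st.1.getD 0 0)
      (pyHeapreplace st.1 (-(PySem.Int.floordiv max_size 2)), st.2 + max_size)) sa i).1.Perm
      ((((fun (st : List Int × Int) _i =>
      let arr := st.1
      let best := (PySem.List.pyRange 1 (PySem.List.len arr) 1).foldl
        (fun best j => if arr.getD best 0 < arr.getD j.toNat 0 then j.toNat else best) 0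
      let m := arr.getD best 0
      (arr.set best (PySem.Int.floordiv m 2), st.2 + m)) sb i).1).map (fun z => -z)) ∧
    IsHeap ((fun (st : List Int × Int) _i =>
      let max_size := -(st.1.getD 0 0)
      (pyHeapreplace st.1 (-(PySem.Int.floordiv max_size 2)), st.2 + max_size)) sa i).1 ∧
    ((fun (st : List Int × Int) _i =>
      let arr := st.1
      let best := (PySem.List.pyRange 1 (PySem.List.len arr) 1).foldl
        (fun best j => if arr.getD best 0 < arr.getD j.toNat 0 then j.toNat else best) 0
      let m := arr.getD best 0
      (arr.set best (PySem.Int.floordiv m 2), st.2 + m)) sb i).1.length = B.length ∧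
    ((fun (st : List Int × Int) _i =>
      let max_size := -(st.1.getD 0 0)
      (pyHeapreplace st.1 (-(PySem.Int.floordiv max_size 2)), st.2 + max_size)) sa i).2 =
    ((fun (st : List Int × Int) _i =>
      let arr := st.1
      let best := (PySem.List.pyRange 1 (PySem.List.len arr) 1).foldl
        (fun best j => if arr.getD best 0 < arr.getD j.toNat 0 then j.toNat else best) 0
      let m := arr.getD best 0
      (arr.set best (PySem.Int.floordiv m 2), st.2 + m)) sb i).2 := by
  obtain ⟨hperm, hheap, hlen, htot⟩ := h
  obtain ⟨ha, t⟩ := sa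
  obtain ⟨hb, t'⟩ := sb
  simp only at hperm hheap hlen htot ⊢
  have hbne : hb ≠ [] := by
    intro hh; rw [hh] at hlen; simp at hlen; exact hB (List.eq_nil_of_length_eq_zero hlen.symm)
  have hbpos : 0 < hb.length := List.length_pos_iff.mpr hbne
  have hapos : 0 < ha.length := by
    have := hperm.length_eq; simp at this; omega
  have hane : ha ≠ [] := by
    intro hh; rw [hh] at hapos; simp at hapos
  -- the scan
  have hscan := scan_best hb (PySem.List.pyRange 1 (PySem.List.len hb) 1) 0 hbpos ?_
  · set best := (PySem.List.pyRange 1 (PySem.List.len hb) 1).foldl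
      (fun best j => if hb.getD best 0 < hb.getD j.toNat 0 then j.toNat else best) 0 with hbestdef
    obtain ⟨hbest, h0best, hmax'⟩ := hscan
    set m := hb.getD best 0 with hmdef
    have hmax : ∀ k, k < hb.length → hb.getD k 0 ≤ m := by
      intro k hk
      rcases Nat.eq_zero_or_pos k with h0 | h0
      · subst h0; exact h0best
      · have hmem : (k : Int) ∈ PySem.List.pyRange 1 (PySem.List.len hb) 1 := by
          rw [PySem.List.mem_pyRange_one]
          simp [PySem.List.len]
          omega
        have := hmax' (k : Int) hmem
        simpa using this
    -- ha.getD 0 0 = -m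
    have hmmem : m ∈ hb := by
      rw [hmdef, List.getD_eq_getElem hb 0 hbest]
      exact List.getElem_mem hbest
    have hnegm : -m ∈ ha := by
      rw [hperm.mem_iff, List.mem_map]
      exact ⟨m, hmmem, rfl⟩
    have ha0 : ha.getD 0 0 = -m := by
      apply le_antisymm
      · obtain ⟨k, hk, hkeq⟩ := List.mem_iff_getElem.mp hnegm
        have := isHeap_root_min ha hheap k hk
        rwa [List.getD_eq_getElem ha 0 hk, hkeq] at this
      · have hmem0 : ha.getD 0 0 ∈ ha := by
          rw [List.getD_eq_getElem ha 0 hapos]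
          exact List.getElem_mem hapos
        rw [hperm.mem_iff, List.mem_map] at hmem0
        obtain ⟨z, hz, hzeq⟩ := hmem0
        obtain ⟨k, hk, hkeq⟩ := List.mem_iff_getElem.mp hz
        have : z ≤ m := by
          have := hmax k hk
          rwa [List.getD_eq_getElem hb 0 hk, hkeq] at this
        omega
    have hmapD : (hb.map (fun z => -z)).getD best 0 = -m := by
      rw [List.getD_eq_getElem _ 0 (by simpa using hbest), List.getElem_map, hmdef,
        List.getD_eq_getElem hb 0 hbest]
    refine ⟨?_, ?_, by simpa using hlen, by rw [htot, ha0]; ring⟩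
    · -- permutation
      have h1 := pyHeapreplace_perm ha (-(PySem.Int.floordiv (-(ha.getD 0 0)) 2)) hane
      rw [ha0] at h1
      simp only [neg_neg] at h1
      have h2 := perm_set_of_getD_eq ha (hb.map (fun z => -z)) 0 best
        (-(PySem.Int.floordiv m 2)) hperm hapos (by simpa using hbest) (by rw [ha0, hmapD])
      have h3 : ((hb.map (fun z => -z)).set best (-(PySem.Int.floordiv m 2)))
          = (hb.set best (PySem.Int.floordiv m 2)).map (fun z => -z) := by
        rw [List.map_set]
      rw [ha0]
      simp only [neg_neg]
      rw [← h3]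
      exact h1.trans h2
    · -- heap
      have := pyHeapreplace_isHeap ha (-(PySem.Int.floordiv (-(ha.getD 0 0)) 2)) hane hheap
      exact this
  · intro j hj
    rw [PySem.List.mem_pyRange_one] at hj
    simp [PySem.List.len] at hj
    omega

theorem nchoc_eq (A : Int) (B : List Int) (hpre : B ≠ [] ∨ A ≤ 0) : nchoc A B = nchoc_alt A B := by
  simp only [nchoc, nchoc_alt]
  by_cases hB : B = []
  · have hA : A ≤ 0 := by tauto
    have hr : PySem.List.pyRange 0 A 1 = [] := by
      rw [List.eq_nil_iff_forall_not_mem]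
      intro j hj
      rw [PySem.List.mem_pyRange_one] at hj
      omega
    rw [hr]
    simp only [List.foldl_nil]
  · have H := foldl_rel
      (fun (sa sb : List Int × Int) =>
        sa.1.Perm (sb.1.map (fun z => -z)) ∧ IsHeap sa.1 ∧ sb.1.length = B.length ∧ sa.2 = sb.2)
      _ _ (fun i sa sb h => step_rel B hB i sa sb h) (PySem.List.pyRange 0 A 1)
      (pyHeapify (B.map (fun x => -x)), 0) (B, 0)
      ⟨pyHeapify_perm _, pyHeapify_isHeap _, rfl, rfl⟩
    rw [H.2.2.2]

-- ===== VERDICT (by name: the statement is the Claim_ definition above) =====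
theorem nchoc_spec : Claim_equal_nchoc := by
  intro A B _hdom hpre
  unfold Pre_nchoc at hpre
  unfold Spec_nchoc
  exact nchoc_eq A B hpre
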